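-- pv_equiv track=rewrite | github.com/feVeRin/Algorithm | problems/1316.py | groupcheck
-- ===== SOURCE A (Python) =====
-- import collections
--
-- def groupcheck(word):
--     check = collections.defaultdict(list)
--     for idx, w in enumerate(word):
--         if w not in check:
--             check[w].append(idx)
--         else:
--             if idx != (check[w].pop())+1:
--                 return False
--             else:
--                 check[w].append(idx)
--
--     return True
-- ===== SOURCE B (Python) =====
-- def groupcheck(word):
--     prev = None
--     seen = set()
--     for ch in word:
--         if ch != prev:
--             if ch in seen:
--                 return False
--             seen.add(ch)
--             prev = ch
--     return True
-- ===== Notes on version B (the rewrite author's own statement) =====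
-- stated objective: simpler
-- what changed: Replaces the defaultdict of per-letter index lists and the idx == last+1 adjacency arithmetic by a single pass keeping only the previous character and a set of letters whose block has started; a letter opening a new block while already in the set means a repeated group (constant-factor faster: no per-char dict/list append/pop).
import Mathlib
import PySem

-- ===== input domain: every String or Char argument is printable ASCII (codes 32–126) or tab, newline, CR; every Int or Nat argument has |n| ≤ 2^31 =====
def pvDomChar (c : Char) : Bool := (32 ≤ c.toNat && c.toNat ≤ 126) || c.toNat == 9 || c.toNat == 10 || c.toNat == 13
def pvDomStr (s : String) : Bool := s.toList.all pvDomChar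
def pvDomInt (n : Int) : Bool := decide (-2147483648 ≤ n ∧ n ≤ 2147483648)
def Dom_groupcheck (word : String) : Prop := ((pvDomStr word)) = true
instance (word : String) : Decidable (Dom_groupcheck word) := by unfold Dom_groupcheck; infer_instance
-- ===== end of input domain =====

-- B replaces A's defaultdict of per-letter index lists (and the idx == last+1 arithmetic)
-- by a previous-character marker plus a set of letters already started: simpler state, same one pass.

-- ===== PORT A =====
-- the for-loop over enumerate(word) with early return, state = the defaultdict 'check'
def groupcheckGo (check : PySem.Dict Char (List Int)) (idx : Int) : List Char → Bool
  | [] => true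
  | w :: ws =>
    if check.contains w = false then
      -- defaultdict access creates [], then append idx
      groupcheckGo (check.insert w (check.getD w [] ++ [idx])) (idx + 1) ws
    else
      match PySem.List.pop? (check.getD w []) (-1) with
      | none => false  -- Python IndexError; unreachable (every stored list is nonempty)
      | some (v, rest') =>
        if idx ≠ v + 1 then false
        else groupcheckGo (check.insert w (rest' ++ [idx])) (idx + 1) ws

def groupcheck (word : String) : Bool :=
  groupcheckGo PySem.Dict.empty 0 word.toList

-- ===== PORT B =====
def groupcheckAltGo (prev : Option Char) (seen : PySem.Set Char) : List Char → Bool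
  | [] => true
  | ch :: ws =>
    if some ch ≠ prev then
      if PySem.Set.contains seen ch then false
      else groupcheckAltGo (some ch) (PySem.Set.add seen ch) ws
    else groupcheckAltGo prev seen ws

def groupcheck_alt (word : String) : Bool :=
  groupcheckAltGo none PySem.Set.empty word.toList

-- ===== PRECONDITION & SPEC =====
def Spec_groupcheck (word : String) (out : Bool) : Prop := out = groupcheck_alt word
instance (word : String) (out : Bool) : Decidable (Spec_groupcheck word out) := by unfold Spec_groupcheck; infer_instance

-- ===== CLAIM (what is proved, stated in full; the proofs are below) =====
def Claim_equal_groupcheck : Prop := ∀ (word : String), Dom_groupcheck word → Spec_groupcheck word (groupcheck word)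

-- ===== LEMMAS AND PROOFS =====

-- relational invariant between A's dict state and B's (prev, seen) state after the same prefix
def pvInv (check : PySem.Dict Char (List Int)) (idx : Int) (prev : Option Char)
    (seen : PySem.Set Char) : Prop :=
  (∀ c, check.contains c = true ↔ c ∈ seen) ∧
  (∀ c, check.contains c = true →
      ∃ k, check.getD c [] = [k] ∧ k < idx ∧ (k + 1 = idx ↔ prev = some c)) ∧
  (∀ c, prev = some c → c ∈ seen)

theorem pvGo_eq (rest : List Char) : ∀ (check : PySem.Dict Char (List Int)) (idx : Int)
    (prev : Option Char) (seen : PySem.Set Char), pvInv check idx prev seen →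
    groupcheckGo check idx rest = groupcheckAltGo prev seen rest := by
  induction rest with
  | nil => intro _ _ _ _ _; rfl
  | cons ch ws ih =>
    intro check idx prev seen hInv
    obtain ⟨h1, h2, h3⟩ := hInv
    by_cases hc : check.contains ch = true
    · -- ch already in the dict / seen
      obtain ⟨k, hg, hk, hiff⟩ := h2 ch hc
      have hm : ch ∈ seen := (h1 ch).mp hc
      have hpop : PySem.List.pop? [k] (-1) = some (k, []) := by
        simp [PySem.List.pop?, PySem.List.pyIdx?]
      by_cases hp : prev = some ch
      · -- same as previous char: both continue
        have hidx : k + 1 = idx := hiff.mpr hp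
        simp only [groupcheckGo, groupcheckAltGo, hc, hg, hpop, hp]
        rw [if_neg (by simp), if_neg (by simp [hidx]), if_neg (by simp)]
        apply ih
        refine ⟨?_, ?_, ?_⟩
        · intro c
          rw [PySem.Dict.contains_insert]
          by_cases hcc : c = ch
          · subst hcc; simp [hm]
          · simp [hcc, h1 c]
        · intro c hcI
          by_cases hcc : c = ch
          · subst hcc
            exact ⟨idx, by simp [PySem.Dict.getD_insert_self], by omega, by simp⟩
          · rw [PySem.Dict.contains_insert] at hcI
            simp [hcc] at hcI
            obtain ⟨k', hg', hk', hiff'⟩ := h2 c hcI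
            refine ⟨k', ?_, by omega, ?_⟩
            · rw [show ([] : List Int) ++ [idx] = [idx] from rfl,
                 PySem.Dict.getD_insert_of_ne check [idx] [] hcc, hg']
            · constructor
              · intro h; omega
              · intro h
                have : ch = c := by injection h
                exact absurd this.symm hcc
        · intro c hcp
          have : c = ch := by injection hcp.symm
          subst this; exact hm
      · -- ch reappears in a new block: both return False
        have hidx : ¬ (idx = k + 1) := fun h => hp (hiff.mp h.symm)
        have hne : some ch ≠ prev := fun h => hp h.symm
        simp only [groupcheckGo, groupcheckAltGo, hc, hg, hpop]
        simp [hidx, hne, PySem.Set.contains, hm]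
    · -- fresh char (or a letter whose block has not started): both open a block
      have hc' : check.contains ch = false := by simpa using hc
      have hm : ch ∉ seen := fun h => hc ((h1 ch).mpr h)
      have hne : some ch ≠ prev := fun h => hm (h3 ch h.symm)
      have hgd : check.getD ch [] = [] := PySem.Dict.getD_of_not_contains check [] hc'
      simp only [groupcheckGo, groupcheckAltGo, hc', hgd]
      rw [if_pos trivial, if_pos hne, if_neg (by simp [PySem.Set.contains, hm])]
      apply ih
      refine ⟨?_, ?_, ?_⟩
      · intro c
        rw [PySem.Dict.contains_insert, PySem.Set.mem_add]
        by_cases hcc : c = ch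
        · subst hcc; simp
        · simp [hcc, h1 c]
      · intro c hcI
        by_cases hcc : c = ch
        · subst hcc
          exact ⟨idx, by simp [PySem.Dict.getD_insert_self], by omega, by simp⟩
        · rw [PySem.Dict.contains_insert] at hcI
          simp [hcc] at hcI
          obtain ⟨k', hg', hk', hiff'⟩ := h2 c hcI
          refine ⟨k', ?_, by omega, ?_⟩
          · rw [show ([] : List Int) ++ [idx] = [idx] from rfl,
               PySem.Dict.getD_insert_of_ne check [idx] [] hcc, hg']
          · constructor
            · intro h; omega
            · intro h
              have : ch = c := by injection h
              exact absurd this.symm hcc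
      · intro c hcp
        have : c = ch := by injection hcp.symm
        exact (PySem.Set.mem_add seen ch c).mpr (Or.inr this)

-- ===== VERDICT (by name: the statement is the Claim_ definition above) =====
theorem groupcheck_spec : Claim_equal_groupcheck := by
  intro word _
  unfold Spec_groupcheck groupcheck groupcheck_alt
  apply pvGo_eq
  refine ⟨?_, ?_, ?_⟩
  · intro c
    simp [PySem.Dict.contains_empty, PySem.Set.empty]
  · intro c h; rw [PySem.Dict.contains_empty] at h; exact absurd h (by simp)
  · intro c h; exact absurd h (by simp)
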